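-- pv_equiv track=rewrite | github.com/mikesndrs/advent_of_code | aoc/aoc_2024/python/ex_07.py | check_valid_equation
-- ===== SOURCE A (Python) =====
-- from typing import List
--
-- def check_valid_equation(
--     result: int, list: List[int], version: int, val: int = 0
-- ) -> bool:
--     """Iterative function to determine whether an equation can be made valid"""
--     if val > result:
--         return False
--     if len(list) == 0:
--         return val == result
--     if check_valid_equation(result, list[1:], version=version, val=val * list[0]):
--         return True
--     if check_valid_equation(result, list[1:], version=version, val=val + list[0]):
--         return True
--     if version == 2 and check_valid_equation(
--         result, list[1:], version=version, val=int(f"{val}{list[0]}")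
--     ):
--         return True
--     return False
-- ===== SOURCE B (Python) =====
-- from typing import List
--
--
-- def check_valid_equation(
--     result: int, list: List[int], version: int, val: int = 0
-- ) -> bool:
--     """Breadth-first sweep: one pass over the numbers keeping the SET of
--     reachable accumulator values (pruned to <= result), rather than a
--     depth-first recursion with list slicing."""
--     frontier = {val} if val <= result else set()
--     for x in list:
--         nxt = set()
--         for v in frontier:
--             nxt.add(v * x)
--             nxt.add(v + x)
--             if version == 2:
--                 nxt.add(int(f"{v}{x}"))
--         frontier = {c for c in nxt if c <= result}
--     return result in frontier
-- ===== Notes on version B (the rewrite author's own statement) =====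
-- stated objective: alternative
-- what changed: Replaces A's depth-first 3-way recursion with O(n) list slicing per call by a single left-to-right pass that maintains the deduplicated set of reachable accumulator values (pruned to <= result), trading A's early exit on success for sharing of repeated intermediate values.
-- outside the precondition, e.g. on check_valid_equation(0, [-1], 2, 0): A returns True, B raises ValueError
import Mathlib
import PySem

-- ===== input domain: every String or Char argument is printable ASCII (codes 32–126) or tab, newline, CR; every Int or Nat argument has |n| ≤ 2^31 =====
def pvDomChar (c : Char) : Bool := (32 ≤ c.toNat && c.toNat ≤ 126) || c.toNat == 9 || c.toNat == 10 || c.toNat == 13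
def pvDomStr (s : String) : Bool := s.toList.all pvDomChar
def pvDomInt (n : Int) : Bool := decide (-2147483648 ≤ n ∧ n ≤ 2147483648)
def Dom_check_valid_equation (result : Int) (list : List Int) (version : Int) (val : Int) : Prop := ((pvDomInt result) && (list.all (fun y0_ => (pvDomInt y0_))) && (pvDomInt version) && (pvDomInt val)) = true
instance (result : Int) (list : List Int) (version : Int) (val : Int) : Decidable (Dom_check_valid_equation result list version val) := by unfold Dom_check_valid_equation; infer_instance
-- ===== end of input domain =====

-- B replaces A's depth-first 3-way recursion by one left-to-right pass keeping the set of
-- reachable accumulator values pruned to <= result (an alternative algorithm, not claimed faster).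

-- shared helper: int(f"{v}{x}") — digit concatenation via Python's str/int, exact
def pvConcat (v x : Int) : Option Int :=
  PySem.Int.ofChars? (PySem.Int.toChars v ++ PySem.Int.toChars x)

-- ===== PORT A =====
def check_valid_equation (result : Int) (list : List Int) (version : Int) (val : Int) : Bool :=
  if val > result then false
  else
    match list with
    | [] => val == result
    | x :: rest =>
      if check_valid_equation result rest version (val * x) then true
      else if check_valid_equation result rest version (val + x) then true
      else if version == 2 then
        match pvConcat val x with
        | some c => check_valid_equation result rest version c
        | none => false   -- Python raises ValueError here; excluded by Pre_
      else false

-- ===== PORT B =====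
-- inner loop: for v in frontier: nxt.add(v*x); nxt.add(v+x); if version==2: nxt.add(int(f"{v}{x}"))
def pvStepAdd (version x : Int) (nxt : PySem.Set Int) (v : Int) : PySem.Set Int :=
  let nxt := nxt.add (v * x)
  let nxt := nxt.add (v + x)
  if version == 2 then
    match pvConcat v x with
    | some c => nxt.add c
    | none => nxt   -- Python raises ValueError here; excluded by Pre_
  else nxt

def pvStep (result version x : Int) (frontier : PySem.Set Int) : PySem.Set Int :=
  let nxt := frontier.foldl (pvStepAdd version x) PySem.Set.empty
  PySem.Set.ofList (nxt.filter (fun c => decide (c ≤ result)))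

def check_valid_equation_alt (result : Int) (list : List Int) (version : Int) (val : Int) : Bool :=
  let f0 : PySem.Set Int := if val ≤ result then PySem.Set.ofList [val] else PySem.Set.empty
  let ff := list.foldl (fun f x => pvStep result version x f) f0
  decide (result ∈ ff)

-- ===== PRECONDITION & SPEC =====
-- Pre_ excludes version-2 inputs containing a negative number: there A's concatenation
-- int(f"{val}{x}") builds a string like "0-5" and may raise ValueError (on a few such
-- inputs A still returns a value because an earlier branch succeeds first — see cites).
def Pre_check_valid_equation (result : Int) (list : List Int) (version : Int) (val : Int) : Prop :=
  version = 2 → ∀ x ∈ list, 0 ≤ x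
instance (result : Int) (list : List Int) (version : Int) (val : Int) : Decidable (Pre_check_valid_equation result list version val) := by unfold Pre_check_valid_equation; infer_instance

def pvWitness_check_valid_equation : Int × List Int × Int × Int := (29, [2, 3, 5], 2, 0)

def Spec_check_valid_equation (result : Int) (list : List Int) (version : Int) (val : Int) (out : Bool) : Prop := out = check_valid_equation_alt result list version val
instance (result : Int) (list : List Int) (version : Int) (val : Int) (out : Bool) : Decidable (Spec_check_valid_equation result list version val out) := by unfold Spec_check_valid_equation; infer_instance

-- ===== CLAIM (what is proved, stated in full; the proofs are below) =====
def Claim_equal_check_valid_equation : Prop := ∀ (result : Int) (list : List Int) (version : Int) (val : Int), Dom_check_valid_equation result list version val → Pre_check_valid_equation result list version val → Spec_check_valid_equation result list version val (check_valid_equation result list version val)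

-- ===== LEMMAS AND PROOFS =====

-- unfolding equation of port A on a cons cell
theorem check_cons (result x : Int) (l : List Int) (version v : Int) :
    check_valid_equation result (x :: l) version v =
      (if v > result then false
       else if check_valid_equation result l version (v * x) then true
       else if check_valid_equation result l version (v + x) then true
       else if version == 2 then
         match pvConcat v x with
         | some c => check_valid_equation result l version c
         | none => false
       else false) := by
  rw [check_valid_equation.eq_def]

-- A returns false as soon as the accumulator exceeds result
theorem check_false_of_gt (result : Int) (list : List Int) (version v : Int)
    (h : result < v) : check_valid_equation result list version v = false := by
  rw [check_valid_equation.eq_def]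
  simp [show v > result from h]

-- logical reading of A on a cons cell
theorem check_cons_iff (result x : Int) (l : List Int) (version v : Int) :
    check_valid_equation result (x :: l) version v = true ↔
      v ≤ result ∧ (check_valid_equation result l version (v * x) = true ∨
        check_valid_equation result l version (v + x) = true ∨
        (version = 2 ∧ ∃ c, pvConcat v x = some c ∧ check_valid_equation result l version c = true)) := by
  rw [check_cons]
  by_cases hgt : v > result
  · simp [hgt]
  · simp only [hgt, if_false]
    constructor
    · intro h
      refine ⟨by omega, ?_⟩
      split_ifs at h with h1 h2 h3
      · exact Or.inl h1
      · exact Or.inr (Or.inl h2)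
      · rcases hc : pvConcat v x with _ | c
        · rw [hc] at h; exact absurd h (by simp)
        · rw [hc] at h
          exact Or.inr (Or.inr ⟨by simpa using h3, c, rfl, h⟩)
    · rintro ⟨-, h1 | h2 | ⟨hver, c, hc, hrec⟩⟩
      · simp [h1]
      · split_ifs <;> simp_all
      · split_ifs with g1 g2 g3
        · rfl
        · rfl
        · rw [hc]; exact hrec
        · simp [hver] at g3

-- membership in the inner fold of B (the `for v in frontier` loop)
theorem mem_inner (version x y : Int) :
    ∀ (f : List Int) (s : PySem.Set Int),
      y ∈ f.foldl (pvStepAdd version x) s ↔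
        y ∈ s ∨ ∃ v ∈ f, (y = v * x ∨ y = v + x ∨ (version = 2 ∧ pvConcat v x = some y)) := by
  intro f
  induction f with
  | nil => simp
  | cons v f ih =>
    intro s
    simp only [List.foldl_cons, ih, List.mem_cons]
    have hadd : y ∈ pvStepAdd version x s v ↔
        y ∈ s ∨ (y = v * x ∨ y = v + x ∨ (version = 2 ∧ pvConcat v x = some y)) := by
      unfold pvStepAdd
      by_cases hv : version = 2
      · rcases hc : pvConcat v x with _ | c
        · simp [hv, PySem.Set.mem_add]
          tauto
        · simp [hv, PySem.Set.mem_add]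
          tauto
      · simp [hv, PySem.Set.mem_add]
        tauto
    rw [hadd]
    constructor
    · rintro ((h | h) | ⟨w, hw, hs⟩)
      · tauto
      · exact Or.inr ⟨v, Or.inl rfl, h⟩
      · exact Or.inr ⟨w, Or.inr hw, hs⟩
    · rintro (h | ⟨w, hw | hw, hs⟩)
      · tauto
      · subst hw; tauto
      · exact Or.inr ⟨w, hw, hs⟩

-- membership in one step of B's sweep
theorem mem_pvStep (result version x y : Int) (f : PySem.Set Int) :
    y ∈ pvStep result version x f ↔
      y ≤ result ∧ ∃ v ∈ f, (y = v * x ∨ y = v + x ∨ (version = 2 ∧ pvConcat v x = some y)) := by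
  unfold pvStep
  simp only [PySem.Set.mem_ofList, List.mem_filter, decide_eq_true_eq]
  rw [mem_inner]
  simp [PySem.Set.empty]
  exact and_comm

-- main invariant: B's remaining sweep over l from frontier f (all values ≤ result)
-- decides whether some value in f lets A succeed on l
theorem loop_iff (result version : Int) :
    ∀ (l : List Int) (f : PySem.Set Int), (∀ v ∈ f, v ≤ result) →
      ((result ∈ l.foldl (fun f x => pvStep result version x f) f) ↔
        ∃ v ∈ f, check_valid_equation result l version v = true) := by
  intro l
  induction l with
  | nil =>
    intro f hf
    simp only [List.foldl_nil]
    constructor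
    · intro h
      refine ⟨result, h, ?_⟩
      rw [check_valid_equation.eq_def]; simp
    · rintro ⟨v, hv, h⟩
      rw [check_valid_equation.eq_def] at h
      by_cases hgt : v > result
      · simp [hgt] at h
      · simp [hgt] at h
        exact h ▸ hv
  | cons x l ih =>
    intro f hf
    simp only [List.foldl_cons]
    rw [ih _ (fun v hv => ((mem_pvStep result version x v f).mp hv).1)]
    constructor
    · rintro ⟨c, hc, hrec⟩
      rcases (mem_pvStep result version x c f).mp hc with ⟨-, v, hv, hcand⟩
      refine ⟨v, hv, ?_⟩
      rw [check_cons_iff]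
      refine ⟨hf v hv, ?_⟩
      rcases hcand with h | h | ⟨h2, hc'⟩
      · exact Or.inl (h ▸ hrec)
      · exact Or.inr (Or.inl (h ▸ hrec))
      · exact Or.inr (Or.inr ⟨h2, c, hc', hrec⟩)
    · rintro ⟨v, hv, h⟩
      rw [check_cons_iff] at h
      rcases h with ⟨-, h1 | h2 | ⟨hver, c, hc, hrec⟩⟩
      · have hle : v * x ≤ result := by
          by_contra hgt
          rw [check_false_of_gt _ _ _ _ (by omega)] at h1; exact absurd h1 (by simp)
        exact ⟨v * x, (mem_pvStep ..).mpr ⟨hle, v, hv, Or.inl rfl⟩, h1⟩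
      · have hle : v + x ≤ result := by
          by_contra hgt
          rw [check_false_of_gt _ _ _ _ (by omega)] at h2; exact absurd h2 (by simp)
        exact ⟨v + x, (mem_pvStep ..).mpr ⟨hle, v, hv, Or.inr (Or.inl rfl)⟩, h2⟩
      · have hle : c ≤ result := by
          by_contra hgt
          rw [check_false_of_gt _ _ _ _ (by omega)] at hrec; exact absurd hrec (by simp)
        exact ⟨c, (mem_pvStep ..).mpr ⟨hle, v, hv, Or.inr (Or.inr ⟨hver, hc⟩)⟩, hrec⟩

-- the two ports agree on every input (Pre_ is needed only for faithfulness to Python)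
theorem ports_agree (result : Int) (list : List Int) (version val : Int) :
    check_valid_equation result list version val = check_valid_equation_alt result list version val := by
  unfold check_valid_equation_alt
  by_cases hval : val ≤ result
  · simp only [hval, if_true]
    rw [Bool.eq_iff_iff, decide_eq_true_iff,
      loop_iff result version list (PySem.Set.ofList [val])
        (by intro v hv; simp [PySem.Set.mem_ofList] at hv; omega)]
    simp [PySem.Set.mem_ofList]
  · simp only [hval, if_false]
    rw [check_false_of_gt _ _ _ _ (by omega)]
    rw [Bool.eq_iff_iff, decide_eq_true_iff,
      loop_iff result version list PySem.Set.empty (by simp [PySem.Set.empty])]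
    simp [PySem.Set.empty]

-- ===== VERDICT (by name: the statement is the Claim_ definition above) =====
theorem check_valid_equation_spec : Claim_equal_check_valid_equation := by
  intro result list version val _ _
  unfold Spec_check_valid_equation
  exact ports_agree result list version val
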